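-- pv_equiv track=rewrite | github.com/human-technology-institute/structure_learning | src/structure_learning/proposals/partition/partition_proposal.py | _calculate_join_possibilities
-- ===== SOURCE A (Python) =====
-- def _calculate_join_possibilities(n, party, posy):
--     m = len(party)
--     join_possibs = [0] * n
--     for k in range(n):
--         join_possibs[k] = m - 1
--         node_element = posy[k]
--         if party[node_element] == 1:  # Nodes in a partition element of size 1
--             if node_element < m - 1:
--                 if party[node_element + 1] == 1:  # And if the next partition element is also size 1
--                     join_possibs[k] = m - 2  # We only allow them to jump to the left to count the swap only once
--     return join_possibs
-- ===== SOURCE B (Python) =====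
-- def _calculate_join_possibilities(n, party, posy):
--     m = len(party)
--     # per-element table: value for element e, via adjacent pairs of party
--     elem_val = [m - 2 if a == 1 and b == 1 else m - 1 for a, b in zip(party, party[1:])]
--     if m:
--         elem_val.append(m - 1)
--     # node k gets the table value of its element
--     return [elem_val[posy[k]] for k in range(n)]
-- ===== Notes on version B (the rewrite author's own statement) =====
-- stated objective: alternative
-- what changed: B precomputes a per-element value table from adjacent pairs (zip of party with its tail) and then maps each node to its element's table entry, instead of A's fused per-node guarded recomputation.
-- intended difference: When posy[k] is -1 (negative-index wraparound) and both the first and last party entries are 1, A returns m-2 for that node because party[-1] wraps to the last element while node_element+1 reads party[0]; B returns m-1, the value of the last element itself, which is the intended value since the last element has no right neighbour to join. — e.g. on _calculate_join_possibilities(1, [1], [-1]): A returns [-1], B returns [0]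
import Mathlib
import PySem

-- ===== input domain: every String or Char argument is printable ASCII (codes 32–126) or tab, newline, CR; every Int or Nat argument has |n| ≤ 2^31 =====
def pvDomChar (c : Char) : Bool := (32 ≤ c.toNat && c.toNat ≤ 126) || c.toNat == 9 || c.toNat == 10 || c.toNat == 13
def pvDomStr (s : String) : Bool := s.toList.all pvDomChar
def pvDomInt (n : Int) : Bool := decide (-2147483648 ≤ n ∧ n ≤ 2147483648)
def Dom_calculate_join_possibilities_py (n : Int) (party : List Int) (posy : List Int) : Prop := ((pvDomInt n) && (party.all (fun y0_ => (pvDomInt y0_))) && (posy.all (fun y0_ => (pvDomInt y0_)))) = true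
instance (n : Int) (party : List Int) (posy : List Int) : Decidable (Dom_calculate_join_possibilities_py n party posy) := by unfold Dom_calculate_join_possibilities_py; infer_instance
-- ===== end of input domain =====

-- B builds a per-element value table from adjacent pairs of party and maps each node through it,
-- instead of A's fused per-node guarded recomputation; equal outside the stated wraparound corner D_.

-- ===== PORT A =====
-- inner body of A's loop for one node whose element is e (posy[k]); 0 on IndexError (excluded by Pre_)
def pvStepA (party : List Int) (e : Int) : Int :=
  let m : Int := party.length
  match PySem.List.pyGet? party e with
  | none => 0
  | some pe =>
    if pe = 1 then
      if e < m - 1 then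
        match PySem.List.pyGet? party (e + 1) with
        | none => 0
        | some pe1 => if pe1 = 1 then m - 2 else m - 1
      else m - 1
    else m - 1

def calculate_join_possibilities_py (n : Int) (party : List Int) (posy : List Int) : List Int :=
  (PySem.List.pyRange 0 n 1).map (fun k =>
    match PySem.List.pyGet? posy k with
    | none => 0
    | some e => pvStepA party e)

-- ===== PORT B =====
-- the per-element table of Source B: zip(party, party[1:]) comprehension, then append m-1 if m ≠ 0
def pvElemVal (party : List Int) : List Int :=
  let m : Int := party.length
  ((party.zip party.tail).map (fun p => if p.1 = 1 ∧ p.2 = 1 then m - 2 else m - 1))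
    ++ (if party.isEmpty then [] else [m - 1])

def calculate_join_possibilities_py_alt (n : Int) (party : List Int) (posy : List Int) : List Int :=
  (PySem.List.pyRange 0 n 1).map (fun k =>
    match PySem.List.pyGet? posy k with
    | none => 0
    | some e => (PySem.List.pyGet? (pvElemVal party) e).getD 0)

-- ===== PRECONDITION & SPEC =====
-- Pre_ excludes exactly the inputs where A raises IndexError: some k < n with posy[k] missing
-- or posy[k] outside [-len(party), len(party)).
def Pre_calculate_join_possibilities_py (n : Int) (party : List Int) (posy : List Int) : Prop :=
  n ≤ (posy.length : Int) ∧
  ∀ e ∈ posy.take n.toNat, -(party.length : Int) ≤ e ∧ e < (party.length : Int)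

instance (n : Int) (party : List Int) (posy : List Int) : Decidable (Pre_calculate_join_possibilities_py n party posy) := by unfold Pre_calculate_join_possibilities_py; infer_instance

def pvWitness_calculate_join_possibilities_py : Int × List Int × List Int := (2, [1, 0, 1], [0, 2])

-- When some node's element index posy[k] is -1 and both the first and last party entries are 1,
-- A returns m-2 for that node (negative-index wraparound makes party[node_element+1] read party[0]),
-- while B returns m-1, the intended value: the last element has no right neighbour to join.
def D_calculate_join_possibilities_py (n : Int) (party : List Int) (posy : List Int) : Prop :=
  (-1 : Int) ∈ posy.take n.toNat ∧ party.headD 0 = 1 ∧ party.getLastD 0 = 1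

instance (n : Int) (party : List Int) (posy : List Int) : Decidable (D_calculate_join_possibilities_py n party posy) := by unfold D_calculate_join_possibilities_py; infer_instance

def Spec_calculate_join_possibilities_py (n : Int) (party : List Int) (posy : List Int) (out : List Int) : Prop := ¬ D_calculate_join_possibilities_py n party posy → out = calculate_join_possibilities_py_alt n party posy
instance (n : Int) (party : List Int) (posy : List Int) (out : List Int) : Decidable (Spec_calculate_join_possibilities_py n party posy out) := by unfold Spec_calculate_join_possibilities_py; infer_instance

def pvDiffWitness_calculate_join_possibilities_py : Int × List Int × List Int := (1, [1], [-1])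
def pvDiffWitnessOut_calculate_join_possibilities_py : (List Int) × (List Int) := ([-1], [0])

-- ===== CLAIM (what is proved, stated in full; the proofs are below) =====
def Claim_unchanged_calculate_join_possibilities_py : Prop := ∀ (n : Int) (party : List Int) (posy : List Int), Dom_calculate_join_possibilities_py n party posy → Pre_calculate_join_possibilities_py n party posy → Spec_calculate_join_possibilities_py n party posy (calculate_join_possibilities_py n party posy)
def Claim_changed_calculate_join_possibilities_py : Prop := Dom_calculate_join_possibilities_py (pvDiffWitness_calculate_join_possibilities_py.1) (pvDiffWitness_calculate_join_possibilities_py.2.1) (pvDiffWitness_calculate_join_possibilities_py.2.2) ∧ Pre_calculate_join_possibilities_py (pvDiffWitness_calculate_join_possibilities_py.1) (pvDiffWitness_calculate_join_possibilities_py.2.1) (pvDiffWitness_calculate_join_possibilities_py.2.2) ∧ D_calculate_join_possibilities_py (pvDiffWitness_calculate_join_possibilities_py.1) (pvDiffWitness_calculate_join_possibilities_py.2.1) (pvDiffWitness_calculate_join_possibilities_py.2.2) ∧ calculate_join_possibilities_py (pvDiffWitness_calculate_join_possibilities_py.1) (pvDiffWitness_calculate_join_possibilities_py.2.1) (pvDiffWitness_calculate_join_possibilities_py.2.2)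 = pvDiffWitnessOut_calculate_join_possibilities_py.1 ∧ calculate_join_possibilities_py_alt (pvDiffWitness_calculate_join_possibilities_py.1) (pvDiffWitness_calculate_join_possibilities_py.2.1) (pvDiffWitness_calculate_join_possibilities_py.2.2) = pvDiffWitnessOut_calculate_join_possibilities_py.2 ∧ pvDiffWitnessOut_calculate_join_possibilities_py.1 ≠ pvDiffWitnessOut_calculate_join_possibilities_py.2
def Claim_exact_calculate_join_possibilities_py : Prop := ∀ (n : Int) (party : List Int) (posy : List Int), Dom_calculate_join_possibilities_py n party posy → Pre_calculate_join_possibilities_py n party posy → D_calculate_join_possibilities_py n party posy → calculate_join_possibilities_py n party posy ≠ calculate_join_possibilities_py_alt n party posy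

-- ===== LEMMAS AND PROOFS =====

theorem pvElemVal_length (party : List Int) : (pvElemVal party).length = party.length := by
  cases party with
  | nil => rfl
  | cons a l => simp [pvElemVal, List.length_zip]

theorem pvHeadD_eq (party : List Int) (h : party ≠ []) :
    party.headD 0 = party[0]'(by cases party <;> simp_all) := by
  cases party with
  | nil => exact absurd rfl h
  | cons a l => rfl

theorem pvGetLastD_eq (party : List Int) (h : party ≠ []) :
    party.getLastD 0 = party[party.length - 1]'(by cases party <;> simp_all) := by
  rw [List.getLastD_eq_getLast?, List.getLast?_eq_getElem?]
  simp [List.getElem?_eq_getElem (by cases party <;> simp_all : party.length - 1 < party.length)]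

-- table entry for a valid element index j
theorem pvElemVal_getElem? (party : List Int) (j : Nat) (hj : j < party.length) :
    (pvElemVal party)[j]? =
      some (if j + 1 < party.length ∧ party.getD j 0 = 1 ∧ party.getD (j + 1) 0 = 1
            then (party.length : Int) - 2 else (party.length : Int) - 1) := by
  have hnil : party ≠ [] := by intro h; subst h; simp at hj
  have hlen : ((party.zip party.tail).map (fun p : Int × Int => if p.1 = 1 ∧ p.2 = 1 then (party.length:Int) - 2 else (party.length:Int) - 1)).length = party.length - 1 := by
    simp [List.length_zip]
  by_cases hj1 : j + 1 < party.length
  · have hjL : j < party.length - 1 := by omega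
    simp only [pvElemVal]
    rw [List.getElem?_append_left (by omega)]
    rw [List.getElem?_map]
    have : (party.zip party.tail)[j]? = some (party[j], party.tail[j]'(by simp [List.length_tail]; omega)) := by
      rw [List.getElem?_eq_getElem (by simp [List.length_zip]; omega)]
      simp [List.getElem_zip]
    rw [this]
    simp [List.getElem_tail, List.getD, List.getElem?_eq_getElem hj, hj1]
  · have hj' : j = party.length - 1 := by omega
    simp only [pvElemVal, List.isEmpty_eq_false_iff.mpr hnil]
    rw [List.getElem?_append_right (by omega)]
    simp [hlen, hj']
    omega

-- A's per-node value agrees with B's table lookup away from the -1 wraparound corner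
theorem pvStep_eq (party : List Int) (e : Int)
    (h1 : -(party.length : Int) ≤ e) (h2 : e < (party.length : Int))
    (hne : ¬(e = -1 ∧ party.headD 0 = 1 ∧ party.getLastD 0 = 1)) :
    pvStepA party e = (PySem.List.pyGet? (pvElemVal party) e).getD 0 := by
  have hml : (pvElemVal party).length = party.length := pvElemVal_length party
  have hnil : party ≠ [] := by intro h; subst h; simp at h1 h2; omega
  by_cases he : 0 ≤ e
  · -- e ≥ 0: both sides read index e.toNat directly
    have hj : e.toNat < party.length := by omega
    have hA : PySem.List.pyGet? party e = some (party[e.toNat]'hj) := by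
      rw [PySem.List.pyGet?_of_nonneg party he, List.getElem?_eq_getElem hj]
    have hB : PySem.List.pyGet? (pvElemVal party) e = (pvElemVal party)[e.toNat]? :=
      PySem.List.pyGet?_of_nonneg (pvElemVal party) he
    rw [hB, pvElemVal_getElem? party e.toNat hj]
    simp only [pvStepA, hA, Option.getD_some]
    by_cases hx : e.toNat + 1 < party.length
    · have he1 : PySem.List.pyGet? party (e + 1) = some (party[e.toNat + 1]'hx) := by
        rw [PySem.List.pyGet?_of_nonneg party (by omega : (0:Int) ≤ e + 1)]
        rw [show (e + 1).toNat = e.toNat + 1 from by omega]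
        rw [List.getElem?_eq_getElem hx]
      have hcond : e < (party.length : Int) - 1 := by omega
      simp only [he1, hcond, if_true]
      simp [hx, List.getD, List.getElem?_eq_getElem hj]
      split_ifs <;> omega
    · have hcond : ¬ (e < (party.length : Int) - 1) := by omega
      simp [hcond, hx]
  · -- e < 0: both wrap to index party.length + e, the two lengths being equal
    have hk0 : 0 < (-e).toNat := by omega
    have hkl : (-e).toNat ≤ party.length := by omega
    have hee : e = -(((-e).toNat : ℕ) : Int) := by omega
    have hj : party.length - (-e).toNat < party.length := by omega
    by_cases he1 : e = -1
    · -- wraps to the LAST element; hne rules out head = last = 1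
      have hh := pvHeadD_eq party hnil
      have hl := pvGetLastD_eq party hnil
      have hm1 : 0 < party.length := by omega
      have hj1 : party.length - 1 < party.length := by omega
      have hA : PySem.List.pyGet? party e = some (party[party.length - 1]'hj1) := by
        rw [he1, PySem.List.pyGet?_neg_one, List.getLast?_eq_getElem?, List.getElem?_eq_getElem hj1]
      have hB : PySem.List.pyGet? (pvElemVal party) e = (pvElemVal party)[party.length - 1]? := by
        rw [he1, PySem.List.pyGet?_neg_one, List.getLast?_eq_getElem?, hml]
      have h0 : PySem.List.pyGet? party (e + 1) = some (party[0]'hm1) := by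
        rw [he1, show (-1 : Int) + 1 = 0 from by omega, PySem.List.pyGet?_zero,
            List.getElem?_eq_getElem hm1]
      have hne' : ¬ ((party[0]'hm1) = 1 ∧ (party[party.length - 1]'hj1) = 1) := by
        rintro ⟨a, b⟩
        exact hne ⟨he1, by rw [hh]; exact a, by rw [hl]; exact b⟩
      have hx : ¬ (party.length - 1 + 1 < party.length) := by omega
      have hcneg : ¬ (party.length - 1 + 1 < party.length ∧ party.getD (party.length - 1) 0 = 1 ∧ party.getD (party.length - 1 + 1) 0 = 1) := fun hc => hx hc.1
      rw [hB, pvElemVal_getElem? party (party.length - 1) hj1]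
      simp only [Option.getD_some]
      rw [if_neg hcneg]
      simp only [pvStepA, hA, h0]
      have hcond : e < (party.length : Int) - 1 := by omega
      by_cases hpl : (party[party.length - 1]'hj1) = 1
      · have hp0 : ¬ (party[0]'hm1) = 1 := fun h0' => hne' ⟨h0', hpl⟩
        rw [if_pos hpl, if_pos hcond, if_neg hp0]
      · rw [if_neg hpl]
    · -- e < -1: wraps to an interior index; the next element wraps consistently
      have hk2 : 2 ≤ (-e).toNat := by omega
      have hx : party.length - (-e).toNat + 1 < party.length := by omega
      have hA : PySem.List.pyGet? party e = some (party[party.length - (-e).toNat]'hj) := by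
        have he' : PySem.List.pyGet? party e = PySem.List.pyGet? party (-(((-e).toNat : ℕ) : Int)) := by
          rw [← hee]
        rw [he', PySem.List.pyGet?_neg_natCast party (-e).toNat hk0 hkl,
            List.getElem?_eq_getElem hj]
      have hB : PySem.List.pyGet? (pvElemVal party) e = (pvElemVal party)[party.length - (-e).toNat]? := by
        have he' : PySem.List.pyGet? (pvElemVal party) e = PySem.List.pyGet? (pvElemVal party) (-(((-e).toNat : ℕ) : Int)) := by
          rw [← hee]
        rw [he', PySem.List.pyGet?_neg_natCast (pvElemVal party) (-e).toNat hk0 (by omega), hml]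
      have he1' : PySem.List.pyGet? party (e + 1) = some (party[party.length - (-e).toNat + 1]'hx) := by
        have he'' : PySem.List.pyGet? party (e + 1) = PySem.List.pyGet? party (-((((-e).toNat - 1 : ℕ)) : Int)) := by
          congr 1
          omega
        rw [he'', PySem.List.pyGet?_neg_natCast party ((-e).toNat - 1) (by omega) (by omega)]
        rw [show party.length - ((-e).toNat - 1) = party.length - (-e).toNat + 1 from by omega]
        rw [List.getElem?_eq_getElem hx]
      rw [hB, pvElemVal_getElem? party _ hj]
      simp only [pvStepA, hA, he1', Option.getD_some]
      have hcond : e < (party.length : Int) - 1 := by omega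
      simp only [hcond, if_true]
      clear hee
      simp [hx, List.getD, List.getElem?_eq_getElem hj]
      split_ifs <;> omega

-- inside D_, A gives m-2 and B gives m-1 at the -1 node
theorem pvStep_ne (party : List Int) (hh : party.headD 0 = 1) (hl : party.getLastD 0 = 1)
    (hnil : party ≠ []) :
    pvStepA party (-1) ≠ (PySem.List.pyGet? (pvElemVal party) (-1)).getD 0 := by
  have hml : (pvElemVal party).length = party.length := pvElemVal_length party
  have hm1 : 0 < party.length := by cases party <;> simp_all
  have hj : party.length - 1 < party.length := by omega
  have hA : PySem.List.pyGet? party (-1) = some (party[party.length - 1]'hj) := by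
    rw [PySem.List.pyGet?_neg_one, List.getLast?_eq_getElem?, List.getElem?_eq_getElem hj]
  have hB : PySem.List.pyGet? (pvElemVal party) (-1) = (pvElemVal party)[party.length - 1]? := by
    rw [PySem.List.pyGet?_neg_one, List.getLast?_eq_getElem?, hml]
  have hpl : party[party.length - 1]'hj = 1 := by rw [← pvGetLastD_eq party hnil]; exact hl
  have hp0 : party[0]'hm1 = 1 := by rw [← pvHeadD_eq party hnil]; exact hh
  have h0 : PySem.List.pyGet? party (-1 + 1) = some (party[0]'hm1) := by
    rw [show (-1 : Int) + 1 = 0 from by omega, PySem.List.pyGet?_zero,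
        List.getElem?_eq_getElem hm1]
  have hx : ¬ (party.length - 1 + 1 < party.length) := by omega
  have hcond : (-1 : Int) < (party.length : Int) - 1 := by omega
  have hcneg : ¬ (party.length - 1 + 1 < party.length ∧ party.getD (party.length - 1) 0 = 1 ∧ party.getD (party.length - 1 + 1) 0 = 1) := fun hc => hx hc.1
  rw [hB, pvElemVal_getElem? party _ hj]
  simp only [Option.getD_some]
  rw [if_neg hcneg]
  simp only [pvStepA, hA, h0]
  rw [if_pos hpl, if_pos hcond, if_pos hp0]
  omega

-- ===== VERDICT (by name: the statement is the Claim_ definition above) =====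
theorem calculate_join_possibilities_py_spec : Claim_unchanged_calculate_join_possibilities_py := by
  intro n party posy _ hpre
  unfold Spec_calculate_join_possibilities_py
  intro hnd
  obtain ⟨hp1, hp2⟩ := hpre
  unfold calculate_join_possibilities_py calculate_join_possibilities_py_alt
  apply List.map_congr_left
  intro k hk
  rw [PySem.List.mem_pyRange_one] at hk
  have hk2 : k.toNat < posy.length := by omega
  have hA : PySem.List.pyGet? posy k = some (posy[k.toNat]'hk2) :=
    PySem.List.pyGet?_eq_some_getElem posy hk.1 (by omega)
  rw [hA]
  have hmem : posy[k.toNat]'hk2 ∈ posy.take n.toNat :=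
    List.mem_take_iff_getElem.mpr ⟨k.toNat, by omega, rfl⟩
  obtain ⟨hb1, hb2⟩ := hp2 _ hmem
  apply pvStep_eq party _ hb1 hb2
  rintro ⟨he1, hhh, hll⟩
  exact hnd ⟨he1 ▸ hmem, hhh, hll⟩

theorem calculate_join_possibilities_py_changed : Claim_changed_calculate_join_possibilities_py := by
  unfold Claim_changed_calculate_join_possibilities_py; decide

theorem calculate_join_possibilities_py_tight : Claim_exact_calculate_join_possibilities_py := by
  intro n party posy _ hpre hd heq
  obtain ⟨hmem, hh, hl⟩ := hd
  have hnil : party ≠ [] := by intro h; subst h; simp at hh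
  obtain ⟨i, hi, hgi⟩ := List.getElem_of_mem hmem
  have hi' : i < posy.length := by simp [List.length_take] at hi; omega
  have hin : (i : Int) < n := by simp [List.length_take] at hi; omega
  have hgi' : posy[i]'hi' = -1 := by
    rw [← hgi, List.getElem_take]
  have hlen : ((PySem.List.pyRange 0 n 1)).length = n.toNat := by
    rw [PySem.List.length_pyRange_one]; congr 1; omega
  have hiL : i < (PySem.List.pyRange 0 n 1).length := by omega
  have hri : (PySem.List.pyRange 0 n 1)[i]'hiL = (i : Int) := by
    rw [PySem.List.getElem_pyRange_one]; omega
  have h1 := congrArg (fun l => l[i]?) heq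
  unfold calculate_join_possibilities_py calculate_join_possibilities_py_alt at h1
  simp only [List.getElem?_map, List.getElem?_eq_getElem hiL, hri, Option.map_some] at h1
  have hposy : PySem.List.pyGet? posy (i : Int) = some (-1) := by
    rw [PySem.List.pyGet?_of_nonneg posy (by omega : (0:Int) ≤ (i : Int))]
    rw [show ((i : Int)).toNat = i from by omega]
    rw [List.getElem?_eq_getElem hi', hgi']
  rw [hposy] at h1
  simp only [Option.some_inj] at h1
  exact pvStep_ne party hh hl hnil h1
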